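-- pv_equiv track=rewrite | github.com/teamteamdev/upmlctf-2018-alpha | writeups/journal/nsychev_journal_superuser.py | gen_token
-- ===== SOURCE A (Python) =====
-- ALPHABET = "24679BCFGKMPQSUW"
--
-- SALT = 0
--
-- def gen_token(login):
--     token = ""
--     for c in login:
--         num = SALT ^ ord(c)
--         for i in range(4):
--             token += ALPHABET[num % 16]
--             num //= 16
--     return token
-- ===== SOURCE B (Python) =====
-- ALPHABET = "24679BCFGKMPQSUW"
--
-- SALT = 0
--
-- def gen_token(login):
--     # Build a translation table once per distinct character, then translate in one pass.
--     table = {}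
--     for ch in set(login):
--         num = SALT ^ ord(ch)
--         enc = []
--         for _ in range(4):
--             enc.append(ALPHABET[num % 16])
--             num //= 16
--         table[ord(ch)] = ''.join(enc)
--     return login.translate(table)
-- ===== Notes on version B (the rewrite author's own statement) =====
-- stated objective: idiomatic
-- what changed: Instead of an explicit per-character nested loop appending to a string, B builds a dict table with one 4-symbol encoding per distinct character of the login and emits the token with a single str.translate call.
import Mathlib
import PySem

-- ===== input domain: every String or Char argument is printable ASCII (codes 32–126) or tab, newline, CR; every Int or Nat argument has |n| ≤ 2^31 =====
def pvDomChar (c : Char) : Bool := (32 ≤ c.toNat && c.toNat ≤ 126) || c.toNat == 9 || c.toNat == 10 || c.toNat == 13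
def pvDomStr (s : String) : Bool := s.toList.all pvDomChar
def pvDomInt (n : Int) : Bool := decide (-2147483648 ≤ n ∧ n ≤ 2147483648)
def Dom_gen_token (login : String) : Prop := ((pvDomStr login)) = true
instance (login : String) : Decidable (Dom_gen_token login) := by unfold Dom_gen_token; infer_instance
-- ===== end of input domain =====

-- B replaces A's explicit per-character nested append loop by a translation table
-- built once per distinct character plus a single translate pass (idiomatic; return value only).

-- ===== PORT A =====
def pvALPHABET : List Char := "24679BCFGKMPQSUW".toList

def pvSALT : Int := 0

def gen_token (login : String) : String :=
  String.mk (login.toList.foldl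
    (fun (token : List Char) c =>
      ((PySem.List.pyRange 0 4 1).foldl
        (fun (st : List Char × Int) _ =>
          (st.1 ++ [PySem.List.pyGetD pvALPHABET (PySem.Int.mod st.2 16) ' '],
           PySem.Int.floordiv st.2 16))
        (token, PySem.Int.bxor pvSALT (c.toNat : Int))).1)
    [])

-- ===== PORT B =====
-- the per-character encoding built inside B's table loop (enc list, joined)
def pvEnc (ch : Char) : List Char :=
  ((PySem.List.pyRange 0 4 1).foldl
    (fun (st : List Char × Int) _ =>
      (st.1 ++ [PySem.List.pyGetD pvALPHABET (PySem.Int.mod st.2 16) ' '],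
       PySem.Int.floordiv st.2 16))
    ([], PySem.Int.bxor pvSALT (ch.toNat : Int))).1

-- B's table: ord(ch) ↦ encoding, over the distinct characters of login
def pvTable (login : String) : PySem.Dict Int (List Char) :=
  (PySem.Set.ofList login.toList).foldl
    (fun d ch => d.insert (ch.toNat : Int) (pvEnc ch)) PySem.Dict.empty

-- str.translate: a character with a table entry is replaced by it, others kept
def gen_token_alt (login : String) : String :=
  String.mk (login.toList.flatMap
    (fun c => ((pvTable login).get? (c.toNat : Int)).getD [c]))

-- ===== PRECONDITION & SPEC =====
def Spec_gen_token (login : String) (out : String) : Prop := out = gen_token_alt login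
instance (login : String) (out : String) : Decidable (Spec_gen_token login out) := by unfold Spec_gen_token; infer_instance

-- ===== CLAIM (what is proved, stated in full; the proofs are below) =====
def Claim_equal_gen_token : Prop := ∀ (login : String), Dom_gen_token login → Spec_gen_token login (gen_token login)

-- ===== LEMMAS AND PROOFS =====

lemma pv_inner_shift (t : List Char) (n : Int) :
    ((PySem.List.pyRange 0 4 1).foldl
      (fun (st : List Char × Int) _ =>
        (st.1 ++ [PySem.List.pyGetD pvALPHABET (PySem.Int.mod st.2 16) ' '],
         PySem.Int.floordiv st.2 16))
      (t, n)).1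
    = t ++ ((PySem.List.pyRange 0 4 1).foldl
      (fun (st : List Char × Int) _ =>
        (st.1 ++ [PySem.List.pyGetD pvALPHABET (PySem.Int.mod st.2 16) ' '],
         PySem.Int.floordiv st.2 16))
      ([], n)).1 := by
  have hR : PySem.List.pyRange 0 4 1 = [0, 1, 2, 3] := by decide
  simp [hR, List.foldl, List.append_assoc]

lemma pv_lookup_preserved (xs : List Char) (d : PySem.Dict Int (List Char)) (c : Char)
    (h : d.get? (c.toNat : Int) = some (pvEnc c)) :
    (xs.foldl (fun d ch => d.insert (ch.toNat : Int) (pvEnc ch)) d).get? (c.toNat : Int)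
      = some (pvEnc c) := by
  induction xs generalizing d with
  | nil => exact h
  | cons x xs ih =>
    apply ih
    by_cases hx : (c.toNat : Int) = (x.toNat : Int)
    · have h2 : c.toNat = x.toNat := by exact_mod_cast hx
      have hc : c = x := Char.ext (UInt32.toNat_inj.mp h2)
      subst hc
      exact PySem.Dict.get?_insert_self _ _ _
    · rw [PySem.Dict.get?_insert_of_ne _ _ hx]
      exact h

lemma pv_lookup_fold (xs : List Char) (d : PySem.Dict Int (List Char)) (c : Char)
    (hc : c ∈ xs) :
    (xs.foldl (fun d ch => d.insert (ch.toNat : Int) (pvEnc ch)) d).get? (c.toNat : Int)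
      = some (pvEnc c) := by
  induction xs generalizing d with
  | nil => cases hc
  | cons x xs ih =>
    by_cases hmem : c ∈ xs
    · exact ih _ hmem
    · have hcx : c = x := by
        rcases hc with _ | h
        · rfl
        · exact absurd (by assumption) hmem
      subst hcx
      exact pv_lookup_preserved xs _ c (PySem.Dict.get?_insert_self _ _ _)

lemma pv_table_lookup (login : String) (c : Char) (hc : c ∈ login.toList) :
    (pvTable login).get? (c.toNat : Int) = some (pvEnc c) := by
  unfold pvTable
  exact pv_lookup_fold _ _ c ((PySem.Set.mem_ofList _ _).mpr hc)

lemma pv_flatMap_congr {α β : Type} (xs : List α) (f g : α → List β)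
    (h : ∀ c ∈ xs, f c = g c) : xs.flatMap f = xs.flatMap g := by
  induction xs with
  | nil => rfl
  | cons x xs ih =>
    simp only [List.flatMap_cons]
    rw [h x (by simp), ih (fun c hc => h c (List.mem_cons_of_mem _ hc))]

-- ===== VERDICT (by name: the statement is the Claim_ definition above) =====
theorem gen_token_spec : Claim_equal_gen_token := by
  intro login _
  unfold Spec_gen_token gen_token gen_token_alt
  congr 1
  have hA : login.toList.foldl
      (fun (token : List Char) c =>
        ((PySem.List.pyRange 0 4 1).foldl
          (fun (st : List Char × Int) _ =>
            (st.1 ++ [PySem.List.pyGetD pvALPHABET (PySem.Int.mod st.2 16) ' '],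
             PySem.Int.floordiv st.2 16))
          (token, PySem.Int.bxor pvSALT (c.toNat : Int))).1)
      []
      = login.toList.foldl (fun token c => token ++ pvEnc c) [] := by
    apply PySem.List.foldl_congr_mem
    intro t c _
    exact pv_inner_shift t _
  rw [hA, PySem.List.foldl_append_eq_flatMap]
  simp only [List.nil_append]
  apply pv_flatMap_congr
  intro c hc
  rw [pv_table_lookup login c hc]
  rfl
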